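-- pv_equiv track=rewrite | github.com/thumn/pacebeats | main.py | get_songs_pace_filtered
-- ===== SOURCE A (Python) =====
-- def get_songs_pace_filtered(workout_bpm, song_tempos):
--     song_ids = []
--     song_added = False
--     for bpm in workout_bpm:
--         song_added = False
--         for (song_id, tempo) in song_tempos.items():
--             if (bpm - 5) <= tempo <= (bpm + 5):
--                 song_ids.append(song_id)
--                 # Don't reuse the song in the playlist.
--                 del song_tempos[song_id]
--                 song_added = True
--                 break
--         # If none of the songs match that bpm, we'll just skip over it.
--     return song_ids
-- ===== SOURCE B (Python) =====
-- def get_songs_pace_filtered(workout_bpm, song_tempos):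
--     # Bucket songs by tempo once (reversed, so each bucket's LAST item is its
--     # earliest song); answer each bpm by scanning only its 11 tempo buckets.
--     buckets = {}
--     for pos, (song_id, tempo) in reversed(list(enumerate(song_tempos.items()))):
--         buckets.setdefault(tempo, []).append((pos, song_id))
--     song_ids = []
--     for bpm in workout_bpm:
--         best = None  # (pos, tempo, song_id) with minimal pos among in-range buckets
--         for t in range(bpm - 5, bpm + 6):
--             q = buckets.get(t)
--             if q:
--                 pos, song_id = q[-1]
--                 if best is None or pos < best[0]:
--                     best = (pos, t, song_id)
--         if best is not None:
--             song_ids.append(best[2])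
--             buckets[best[1]].pop()
--     return song_ids
-- ===== Notes on version B (the rewrite author's own statement) =====
-- stated objective: faster
-- what changed: B replaces A's per-bpm rescan of the whole remaining song dict by a one-time bucketing of songs by tempo (each bucket a stack whose top is its earliest song), answering each bpm by inspecting only the 11 tempo buckets bpm-5..bpm+5 and popping the chosen bucket; B also does not mutate the caller's song_tempos dict, while A deletes matched songs from it.
import Mathlib
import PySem

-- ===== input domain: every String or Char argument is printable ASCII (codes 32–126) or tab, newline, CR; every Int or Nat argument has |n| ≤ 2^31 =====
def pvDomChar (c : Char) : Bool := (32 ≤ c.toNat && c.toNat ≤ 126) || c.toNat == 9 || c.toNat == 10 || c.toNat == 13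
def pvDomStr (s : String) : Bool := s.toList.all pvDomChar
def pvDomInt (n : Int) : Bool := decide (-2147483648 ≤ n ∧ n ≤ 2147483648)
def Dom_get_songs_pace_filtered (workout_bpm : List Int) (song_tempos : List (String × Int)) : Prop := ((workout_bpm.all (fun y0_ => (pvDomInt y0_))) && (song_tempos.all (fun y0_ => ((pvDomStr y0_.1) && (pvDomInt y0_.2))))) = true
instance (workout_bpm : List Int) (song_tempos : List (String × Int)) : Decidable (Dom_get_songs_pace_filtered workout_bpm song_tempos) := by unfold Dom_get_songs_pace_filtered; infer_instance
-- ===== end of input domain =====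

-- B buckets the songs by tempo once and scans only the 11 in-range tempo buckets per bpm
-- instead of rescanning the whole remaining song dict (objective: faster). A mutates the
-- caller's song_tempos dict (deletes matched songs); B does not — the equivalence proved
-- here is about the return value only.


-- ===== PORT A =====
-- inner 'for (song_id, tempo) in song_tempos.items(): … break': first in-range song id
def pvScan (bpm : Int) : List (String × Int) → Option String
  | [] => none
  | (sid, t) :: rest =>
    if bpm - 5 ≤ t ∧ t ≤ bpm + 5 then some sid else pvScan bpm rest

def get_songs_pace_filtered (workout_bpm : List Int) (song_tempos : List (String × Int)) : List String :=
  (workout_bpm.foldl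
    (fun (acc : List String × PySem.Dict String Int) bpm =>
      match pvScan bpm acc.2.items with
      | some sid => (acc.1 ++ [sid], acc.2.erase sid)   -- append + del song_tempos[song_id] + break
      | none => acc)
    ([], PySem.Dict.mk song_tempos)).1

-- ===== PORT B =====
-- buckets.setdefault(tempo, []).append((pos, song_id)) over reversed(enumerate(items))
def pvBuildBuckets (song_tempos : List (String × Int)) : PySem.Dict Int (List (Int × String)) :=
  ((PySem.List.enumerate song_tempos).reverse).foldl
    (fun d p => d.modify p.2.2 [] (fun q => q ++ [(p.1, p.2.1)])) PySem.Dict.empty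

-- one iteration of 'for t in range(bpm - 5, bpm + 6): …'
def pvBestStep (buckets : PySem.Dict Int (List (Int × String)))
    (best : Option (Int × Int × String)) (t : Int) : Option (Int × Int × String) :=
  match buckets.get? t with
  | none => best
  | some q =>
    if q = [] then best
    else
      match PySem.List.pyGet? q (-1) with     -- q[-1]; q ≠ [] so this is always `some`
      | none => best
      | some (pos, sid) =>
        match best with
        | none => some (pos, t, sid)
        | some b => if pos < b.1 then some (pos, t, sid) else some b

def get_songs_pace_filtered_alt (workout_bpm : List Int) (song_tempos : List (String × Int)) : List String :=
  (workout_bpm.foldl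
    (fun (acc : List String × PySem.Dict Int (List (Int × String))) bpm =>
      match (PySem.List.pyRange (bpm - 5) (bpm + 6) 1).foldl (pvBestStep acc.2) none with
      | none => acc
      | some (_, t, sid) => (acc.1 ++ [sid], acc.2.modify t [] List.dropLast))  -- buckets[best[1]].pop()
    ([], pvBuildBuckets song_tempos)).1

-- ===== PRECONDITION & SPEC =====
-- Pre_ excludes association lists with duplicate song ids: a Python dict cannot contain
-- duplicate keys, so such lists represent no input of the Python programs.
def Pre_get_songs_pace_filtered (workout_bpm : List Int) (song_tempos : List (String × Int)) : Prop :=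
  (song_tempos.map Prod.fst).Nodup
instance (workout_bpm : List Int) (song_tempos : List (String × Int)) : Decidable (Pre_get_songs_pace_filtered workout_bpm song_tempos) := by unfold Pre_get_songs_pace_filtered; infer_instance

def pvWitness_get_songs_pace_filtered : List Int × (List (String × Int)) :=
  ([100, 50, 0], [("a", 98), ("b", 102), ("c", 50)])

def Spec_get_songs_pace_filtered (workout_bpm : List Int) (song_tempos : List (String × Int)) (out : List String) : Prop := out = get_songs_pace_filtered_alt workout_bpm song_tempos
instance (workout_bpm : List Int) (song_tempos : List (String × Int)) (out : List String) : Decidable (Spec_get_songs_pace_filtered workout_bpm song_tempos out) := by unfold Spec_get_songs_pace_filtered; infer_instance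

-- ===== CLAIM (what is proved, stated in full; the proofs are below) =====
def Claim_equal_get_songs_pace_filtered : Prop := ∀ (workout_bpm : List Int) (song_tempos : List (String × Int)), Dom_get_songs_pace_filtered workout_bpm song_tempos → Pre_get_songs_pace_filtered workout_bpm song_tempos → Spec_get_songs_pace_filtered workout_bpm song_tempos (get_songs_pace_filtered workout_bpm song_tempos)

-- ===== LEMMAS AND PROOFS =====

-- abbreviations used only by the proofs
def pvP (bpm : Int) (p : Int × String × Int) : Bool := decide (bpm - 5 ≤ p.2.2 ∧ p.2.2 ≤ bpm + 5)

def pvG (p : Int × String × Int) : Int × Int × String := (p.1, p.2.2, p.2.1)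

def pvMerge (o : Option (Int × Int × String)) (c : Int × Int × String) : Option (Int × Int × String) :=
  match o with
  | none => some c
  | some b => if c.1 < b.1 then some c else some b

def pvCand (r : List (Int × String × Int)) (t : Int) : Option (Int × Int × String) :=
  ((r.filter (fun p => p.2.2 == t)).head?).map (fun p => (p.1, t, p.2.1))

def pvInv (r : List (Int × String × Int)) (d : PySem.Dict String Int)
    (bk : PySem.Dict Int (List (Int × String))) : Prop :=
  d.items = r.map (fun p => p.2)
  ∧ (r.map (fun p => p.2.1)).Nodup
  ∧ r.Pairwise (fun p q => p.1 < q.1)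
  ∧ ∀ t, bk.getD t [] = ((r.filter (fun p => p.2.2 == t)).map (fun p => (p.1, p.2.1))).reverse

theorem pvGetNegOne {α : Type} (q : List α) (h : q ≠ []) :
    PySem.List.pyGet? q (-1) = q.getLast? := by
  have hl : 1 ≤ q.length := List.length_pos_of_ne_nil h
  unfold PySem.List.pyGet? PySem.List.pyIdx?
  rw [if_neg (by omega), if_pos (by omega)]
  simp [List.getLast?_eq_getElem?]

theorem pvBucketsGetD (l : List (Int × String × Int)) (d : PySem.Dict Int (List (Int × String))) (t : Int) :
    (l.foldl (fun d p => d.modify p.2.2 [] (fun q => q ++ [(p.1, p.2.1)])) d).getD t []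
      = d.getD t [] ++ (l.filter (fun p => p.2.2 == t)).map (fun p => (p.1, p.2.1)) := by
  induction l generalizing d with
  | nil => simp
  | cons p l ih =>
    simp only [List.foldl_cons, List.filter_cons]
    rw [ih]
    by_cases hpt : p.2.2 = t
    · simp [hpt]
    · simp [hpt, PySem.Dict.getD_modify, Ne.symm hpt]

theorem pvScanEqFind (bpm : Int) (r : List (Int × String × Int)) :
    pvScan bpm (r.map (fun p => p.2)) = (r.find? (pvP bpm)).map (fun p => p.2.1) := by
  induction r with
  | nil => rfl
  | cons p r ih =>
    simp only [List.map_cons, pvScan, List.find?_cons]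
    by_cases h : bpm - 5 ≤ p.2.2 ∧ p.2.2 ≤ bpm + 5
    · have hp : pvP bpm p = true := by unfold pvP; exact decide_eq_true h
      rw [if_pos h, hp]
      rfl
    · have hp : pvP bpm p = false := by unfold pvP; exact decide_eq_false h
      rw [if_neg h, hp, ih]

theorem pvBestStepEqMerge (bk : PySem.Dict Int (List (Int × String))) (r : List (Int × String × Int))
    (h4 : ∀ t, bk.getD t [] = ((r.filter (fun p => p.2.2 == t)).map (fun p => (p.1, p.2.1))).reverse)
    (o : Option (Int × Int × String)) (t : Int) :
    pvBestStep bk o t = match pvCand r t with | none => o | some c => pvMerge o c := by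
  have hgd := h4 t
  cases hg : bk.get? t with
  | none =>
    rw [PySem.Dict.getD_eq_get?_getD, hg] at hgd
    have hf : r.filter (fun p => p.2.2 == t) = [] := by simpa using hgd.symm
    simp [pvBestStep, pvCand, hg, hf]
  | some q =>
    rw [PySem.Dict.getD_eq_get?_getD, hg] at hgd
    simp only [Option.getD_some] at hgd
    by_cases hq : q = []
    · have hf : r.filter (fun p => p.2.2 == t) = [] := by
        rw [hq] at hgd; simpa using hgd.symm
      simp [pvBestStep, pvCand, hg, hq, hf]
    · have hfne : r.filter (fun p => p.2.2 == t) ≠ [] := by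
        intro hf; rw [hf] at hgd; simp at hgd; exact hq hgd
      obtain ⟨p0, l0, hf⟩ := List.exists_cons_of_ne_nil hfne
      simp only [pvBestStep, pvCand, hg]
      rw [if_neg hq, pvGetNegOne q hq, hgd, hf]
      simp [List.getLast?_reverse, pvMerge]

theorem pvFoldFilterMap (bk : PySem.Dict Int (List (Int × String))) (r : List (Int × String × Int))
    (h4 : ∀ t, bk.getD t [] = ((r.filter (fun p => p.2.2 == t)).map (fun p => (p.1, p.2.1))).reverse)
    (ts : List Int) (o : Option (Int × Int × String)) :
    ts.foldl (pvBestStep bk) o = (ts.filterMap (pvCand r)).foldl pvMerge o := by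
  induction ts generalizing o with
  | nil => rfl
  | cons t ts ih =>
    simp only [List.foldl_cons, List.filterMap_cons]
    rw [pvBestStepEqMerge bk r h4 o t]
    cases hc : pvCand r t with
    | none => simp [ih]
    | some c => simp [ih]

theorem pvMergeFoldMem (l : List (Int × Int × String)) (o : Option (Int × Int × String))
    (res : Int × Int × String) (h : l.foldl pvMerge o = some res) :
    some res = o ∨ res ∈ l := by
  induction l generalizing o with
  | nil => left; exact h.symm
  | cons c l ih =>
    simp only [List.foldl_cons] at h
    rcases ih _ h with hh | hh
    · cases o with
      | none =>
        simp only [pvMerge] at hh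
        rw [Option.some_inj] at hh
        right; rw [hh]; exact List.mem_cons_self ..
      | some b =>
        simp only [pvMerge] at hh
        by_cases hcb : c.1 < b.1
        · rw [if_pos hcb, Option.some_inj] at hh
          right; rw [hh]; exact List.mem_cons_self ..
        · rw [if_neg hcb] at hh
          left; exact hh
    · right; exact List.mem_cons_of_mem _ hh

theorem pvMergeFoldLe (l : List (Int × Int × String)) (o : Option (Int × Int × String))
    (res : Int × Int × String) (h : l.foldl pvMerge o = some res) :
    (∀ c ∈ l, res.1 ≤ c.1) ∧ (∀ b, o = some b → res.1 ≤ b.1) := by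
  induction l generalizing o with
  | nil =>
    simp only [List.foldl_nil] at h
    refine ⟨by simp, ?_⟩
    intro b hb
    rw [hb] at h
    injection h with h
    rw [h]
  | cons c l ih =>
    simp only [List.foldl_cons] at h
    obtain ⟨ih1, ih2⟩ := ih _ h
    have key : res.1 ≤ c.1 ∧ ∀ b, o = some b → res.1 ≤ b.1 := by
      cases o with
      | none => exact ⟨ih2 c rfl, by simp⟩
      | some b =>
        simp only [pvMerge] at ih2
        by_cases hcb : c.1 < b.1
        · have hc := ih2 c (by rw [if_pos hcb])
          refine ⟨hc, ?_⟩
          intro b' hb'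
          injection hb' with hb'
          subst hb'
          omega
        · have hb2 := ih2 b (by rw [if_neg hcb])
          refine ⟨by omega, ?_⟩
          intro b' hb'
          injection hb' with hb'
          subst hb'
          exact hb2
    refine ⟨?_, key.2⟩
    intro x hx
    rcases List.mem_cons.mp hx with hx | hx
    · rw [hx]; exact key.1
    · exact ih1 x hx

theorem pvMergeFoldSome (l : List (Int × Int × String)) (o : Option (Int × Int × String))
    (hne : l ≠ []) : (l.foldl pvMerge o).isSome := by
  have key : ∀ (l : List (Int × Int × String)) (b : Int × Int × String),
      (l.foldl pvMerge (some b)).isSome := by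
    intro l
    induction l with
    | nil => simp
    | cons c l ih =>
      intro b
      simp only [List.foldl_cons]
      by_cases hcb : c.1 < b.1
      · rw [show pvMerge (some b) c = some c from by simp [pvMerge, hcb]]
        apply ih
      · rw [show pvMerge (some b) c = some b from by simp [pvMerge, hcb]]
        apply ih
  obtain ⟨c, l, rfl⟩ := List.exists_cons_of_ne_nil hne
  simp only [List.foldl_cons]
  cases o with
  | none => exact key l c
  | some b =>
    by_cases hcb : c.1 < b.1
    · rw [show pvMerge (some b) c = some c from by simp [pvMerge, hcb]]
      apply key
    · rw [show pvMerge (some b) c = some b from by simp [pvMerge, hcb]]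
      apply key

theorem pvBestEqFind (bpm : Int) (bk : PySem.Dict Int (List (Int × String))) (r : List (Int × String × Int))
    (h3 : r.Pairwise (fun p q => p.1 < q.1))
    (h4 : ∀ t, bk.getD t [] = ((r.filter (fun p => p.2.2 == t)).map (fun p => (p.1, p.2.1))).reverse) :
    (PySem.List.pyRange (bpm - 5) (bpm + 6) 1).foldl (pvBestStep bk) none
      = (r.find? (pvP bpm)).map pvG := by
  rw [pvFoldFilterMap bk r h4]
  cases hf : r.find? (pvP bpm) with
  | none =>
    have hnone : ∀ t ∈ PySem.List.pyRange (bpm - 5) (bpm + 6) 1, pvCand r t = none := by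
      intro t ht
      rw [PySem.List.mem_pyRange_one] at ht
      unfold pvCand
      rw [Option.map_eq_none_iff, List.head?_eq_none_iff, List.filter_eq_nil_iff]
      intro p hp hteq
      have hnp := List.find?_eq_none.mp hf p hp
      apply hnp
      simp only [beq_iff_eq] at hteq
      unfold pvP
      rw [decide_eq_true_iff]
      omega
    rw [List.filterMap_eq_nil_iff.mpr hnone]
    rfl
  | some p0 =>
    obtain ⟨hP, as, bs, hr, has⟩ := List.find?_eq_some_iff_append.mp hf
    have hPprop : bpm - 5 ≤ p0.2.2 ∧ p0.2.2 ≤ bpm + 5 := by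
      unfold pvP at hP; exact of_decide_eq_true hP
    have hbs : ∀ q ∈ bs, p0.1 < q.1 := by
      rw [hr] at h3
      exact (List.pairwise_cons.mp (List.pairwise_append.mp h3).2.1).1
    have hasfil : ∀ (u : Int), bpm - 5 ≤ u → u ≤ bpm + 5 →
        as.filter (fun p => p.2.2 == u) = [] := by
      intro u hu1 hu2
      rw [List.filter_eq_nil_iff]
      intro a ha hteq
      have hna := has a ha
      simp only [beq_iff_eq] at hteq
      unfold pvP at hna
      rw [Bool.not_eq_eq_eq_not, Bool.not_true, decide_eq_false_iff_not] at hna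
      exact hna (by omega)
    -- every candidate comes from an in-range element of r
    have hboundeq : ∀ c ∈ (PySem.List.pyRange (bpm - 5) (bpm + 6) 1).filterMap (pvCand r),
        p0.1 ≤ c.1 ∧ (c.1 = p0.1 → c = pvG p0) := by
      intro c hc
      obtain ⟨t, ht, hcand⟩ := List.mem_filterMap.mp hc
      rw [PySem.List.mem_pyRange_one] at ht
      unfold pvCand at hcand
      obtain ⟨q, hq, hqc⟩ := Option.map_eq_some_iff.mp hcand
      have hqmem : q ∈ r.filter (fun p => p.2.2 == t) :=
        List.mem_of_mem_head? (by rw [hq]; exact rfl)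
      obtain ⟨hqr, hqt⟩ := List.mem_filter.mp hqmem
      simp only [beq_iff_eq] at hqt
      rw [hr] at hqr
      rcases List.mem_append.mp hqr with hqas | hqmid
      · exact absurd (hasfil t (by omega) (by omega) ▸
          List.mem_filter.mpr ⟨hqas, by simp [hqt]⟩) (List.not_mem_nil)
      · rcases List.mem_cons.mp hqmid with hq0 | hqbs
        · subst hq0
          constructor
          · rw [← hqc]
          · intro _
            rw [← hqc]
            unfold pvG
            rw [hqt]
        · have := hbs q hqbs
          constructor
          · rw [← hqc]; simp; omega
          · intro hceq; rw [← hqc] at hceq; simp at hceq; omega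
    -- p0's own tempo produces the candidate pvG p0
    have hcand0 : pvCand r p0.2.2 = some (pvG p0) := by
      unfold pvCand
      have hfil : r.filter (fun p => p.2.2 == p0.2.2)
          = p0 :: bs.filter (fun p => p.2.2 == p0.2.2) := by
        rw [hr, List.filter_append, hasfil p0.2.2 hPprop.1 hPprop.2, List.filter_cons]
        simp
      rw [hfil]
      simp [pvG]
    have hmem : pvG p0 ∈ (PySem.List.pyRange (bpm - 5) (bpm + 6) 1).filterMap (pvCand r) :=
      List.mem_filterMap.mpr ⟨p0.2.2,
        by rw [PySem.List.mem_pyRange_one]; omega, hcand0⟩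
    have hne : (PySem.List.pyRange (bpm - 5) (bpm + 6) 1).filterMap (pvCand r) ≠ [] := by
      intro h0; rw [h0] at hmem; exact absurd hmem (List.not_mem_nil)
    obtain ⟨res, hres⟩ := Option.isSome_iff_exists.mp (pvMergeFoldSome _ none hne)
    rw [hres]
    have hresmem : res ∈ (PySem.List.pyRange (bpm - 5) (bpm + 6) 1).filterMap (pvCand r) := by
      rcases pvMergeFoldMem _ none res hres with hh | hh
      · exact absurd hh (by simp)
      · exact hh
    have hle := (pvMergeFoldLe _ none res hres).1 (pvG p0) hmem
    have hge := (hboundeq res hresmem).1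
    have : res = pvG p0 := (hboundeq res hresmem).2 (by unfold pvG at hle; omega)
    rw [this]
    rfl

theorem pvEnumIds (xs : List (String × Int)) (s : Int) :
    (PySem.List.enumerate xs s).map (fun p => p.2.1) = xs.map Prod.fst := by
  induction xs generalizing s with
  | nil => simp [PySem.List.enumerate_nil]
  | cons x xs ih => simp [PySem.List.enumerate_cons, ih]

theorem pvInvInit (st : List (String × Int)) (hPre : (st.map Prod.fst).Nodup) :
    pvInv (PySem.List.enumerate st) (PySem.Dict.mk st) (pvBuildBuckets st) := by
  refine ⟨?_, ?_, ?_, ?_⟩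
  · exact (PySem.List.map_snd_enumerate st 0).symm
  · rw [pvEnumIds]; exact hPre
  · exact PySem.List.pairwise_lt_enumerate st 0
  · intro t
    unfold pvBuildBuckets
    rw [pvBucketsGetD]
    simp [List.filter_reverse, List.map_reverse]

theorem pvInvStep (bpm : Int) (r : List (Int × String × Int)) (d : PySem.Dict String Int)
    (bk : PySem.Dict Int (List (Int × String))) (hInv : pvInv r d bk)
    (p0 : Int × String × Int) (hf : r.find? (pvP bpm) = some p0) :
    ∃ r', pvInv r' (d.erase p0.2.1) (bk.modify p0.2.2 [] List.dropLast) := by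
  obtain ⟨h1, h2, h3, h4⟩ := hInv
  obtain ⟨hP, as, bs, hr, has⟩ := List.find?_eq_some_iff_append.mp hf
  have hPprop : bpm - 5 ≤ p0.2.2 ∧ p0.2.2 ≤ bpm + 5 := by
    unfold pvP at hP; exact of_decide_eq_true hP
  have hsub : (as ++ bs).Sublist r := by
    rw [hr]
    exact (List.sublist_cons_self p0 bs).append_left as
  have hids : ∀ q ∈ as ++ bs, q.2.1 ≠ p0.2.1 := by
    intro q hq hqe
    have h2' := h2
    rw [hr, List.map_append, List.map_cons, List.nodup_append] at h2'
    rcases List.mem_append.mp hq with hqa | hqb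
    · have hm1 : q.2.1 ∈ List.map (fun p => p.2.1) as := List.mem_map_of_mem hqa
      have hm2 : q.2.1 ∈ p0.2.1 :: List.map (fun p => p.2.1) bs := by
        rw [hqe]; exact List.mem_cons_self ..
      exact h2'.2.2 q.2.1 hm1 q.2.1 hm2 rfl
    · have hm : p0.2.1 ∈ List.map (fun p => p.2.1) bs := by
        rw [← hqe]; exact List.mem_map_of_mem hqb
      exact (List.nodup_cons.mp h2'.2.1).1 hm
  have hasfil : as.filter (fun p => p.2.2 == p0.2.2) = [] := by
    rw [List.filter_eq_nil_iff]
    intro a ha hteq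
    have hna := has a ha
    simp only [beq_iff_eq] at hteq
    unfold pvP at hna
    rw [Bool.not_eq_eq_eq_not, Bool.not_true, decide_eq_false_iff_not] at hna
    exact hna (by omega)
  refine ⟨as ++ bs, ?_, ?_, ?_, ?_⟩
  · -- items of the erased dict
    show (d.items.filter (fun p => !(p.1 == p0.2.1))) = (as ++ bs).map (fun p => p.2)
    have hkeep : ∀ (l : List (Int × String × Int)), (∀ q ∈ l, q.2.1 ≠ p0.2.1) →
        (l.map (fun p => p.2)).filter (fun p => !(p.1 == p0.2.1)) = l.map (fun p => p.2) := by
      intro l hl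
      rw [List.filter_eq_self]
      intro a ha
      obtain ⟨q, hq, rfl⟩ := List.mem_map.mp ha
      simp [hl q hq]
    rw [h1, hr, List.map_append, List.map_cons, List.filter_append, List.filter_cons]
    simp only [beq_self_eq_true, Bool.not_true]
    rw [hkeep as (fun q hq => hids q (List.mem_append.mpr (Or.inl hq))),
        hkeep bs (fun q hq => hids q (List.mem_append.mpr (Or.inr hq))), List.map_append]
    simp
  · exact h2.sublist (hsub.map _)
  · exact h3.sublist hsub
  · intro t
    rw [PySem.Dict.getD_modify]
    by_cases ht : t = p0.2.2
    · subst ht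
      rw [if_pos rfl, h4 p0.2.2]
      have hfil : r.filter (fun p => p.2.2 == p0.2.2) = p0 :: bs.filter (fun p => p.2.2 == p0.2.2) := by
        rw [hr, List.filter_append, hasfil, List.filter_cons]
        simp
      rw [hfil]
      simp only [List.map_cons, List.reverse_cons, List.dropLast_concat]
      rw [List.filter_append, hasfil]
      simp
    · rw [if_neg ht, h4 t, hr, List.filter_append, List.filter_append, List.filter_cons]
      have : ¬(p0.2.2 == t) = true := by simpa using Ne.symm ht
      simp [this]

theorem pvMainFold (wb : List Int) :
    ∀ (r : List (Int × String × Int)) (d : PySem.Dict String Int)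
      (bk : PySem.Dict Int (List (Int × String))) (acc : List String), pvInv r d bk →
    (wb.foldl
      (fun (acc : List String × PySem.Dict String Int) bpm =>
        match pvScan bpm acc.2.items with
        | some sid => (acc.1 ++ [sid], acc.2.erase sid)
        | none => acc) (acc, d)).1
    = (wb.foldl
      (fun (acc : List String × PySem.Dict Int (List (Int × String))) bpm =>
        match (PySem.List.pyRange (bpm - 5) (bpm + 6) 1).foldl (pvBestStep acc.2) none with
        | none => acc
        | some (_, t, sid) => (acc.1 ++ [sid], acc.2.modify t [] List.dropLast)) (acc, bk)).1 := by
  induction wb with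
  | nil => intro r d bk acc _; rfl
  | cons bpm wb ih =>
    intro r d bk acc hInv
    obtain ⟨h1, h2, h3, h4⟩ := hInv
    simp only [List.foldl_cons]
    rw [h1, pvScanEqFind, pvBestEqFind bpm bk r h3 h4]
    cases hf : r.find? (pvP bpm) with
    | none =>
      simp only [Option.map_none]
      exact ih r d bk acc ⟨h1, h2, h3, h4⟩
    | some p0 =>
      simp only [Option.map_some]
      obtain ⟨r', hInv'⟩ := pvInvStep bpm r d bk ⟨h1, h2, h3, h4⟩ p0 hf
      exact ih r' _ _ _ hInv'


-- ===== VERDICT (by name: the statement is the Claim_ definition above) =====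
theorem get_songs_pace_filtered_spec : Claim_equal_get_songs_pace_filtered := by
  intro wb st _hDom hPre
  unfold Spec_get_songs_pace_filtered
  unfold get_songs_pace_filtered get_songs_pace_filtered_alt
  exact pvMainFold wb (PySem.List.enumerate st) (PySem.Dict.mk st) (pvBuildBuckets st) [] (pvInvInit st hPre)
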